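-- pv_equiv track=rewrite | github.com/PardhuKadali/INNOMATICS_BATCH_225 | stringmethods.py | Rpartition
-- ===== SOURCE A (Python) =====
-- def Rpartition(word,sep):
--     separator_index = -1
--
--     for i in range(len(word) - 1, -1, -1):
--         if word[i] == sep:
--             separator_index = i
--             break
--
--     if separator_index == -1:
--         return ('', '', word)
--     else:
--         prefix = word[:separator_index]
--         suffix = word[separator_index + 1:]
--         return (prefix, sep, suffix)
-- ===== SOURCE B (Python) =====
-- def Rpartition(word, sep):
--     indices = [i for i, c in enumerate(word) if c == sep]
--     if not indices:
--         return ('', '', word)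
--     i = indices[-1]
--     return (word[:i], sep, word[i + 1:])
-- ===== Notes on version B (the rewrite author's own statement) =====
-- stated objective: alternative
-- what changed: A scans the string backwards with an early break to find the last separator position; B collects all matching positions in one forward enumerate pass and takes the last element of that list.
import Mathlib
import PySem

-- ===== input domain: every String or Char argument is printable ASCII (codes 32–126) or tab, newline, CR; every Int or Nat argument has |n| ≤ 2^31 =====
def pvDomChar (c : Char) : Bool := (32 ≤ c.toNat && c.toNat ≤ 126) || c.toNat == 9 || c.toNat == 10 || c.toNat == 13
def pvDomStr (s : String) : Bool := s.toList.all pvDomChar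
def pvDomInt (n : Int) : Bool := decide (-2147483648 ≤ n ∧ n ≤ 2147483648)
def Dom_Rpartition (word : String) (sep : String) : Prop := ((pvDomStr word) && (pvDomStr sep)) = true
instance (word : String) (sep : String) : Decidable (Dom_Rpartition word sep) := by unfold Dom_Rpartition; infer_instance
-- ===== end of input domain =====

-- B replaces A's backward scan-with-break by one forward enumerate pass collecting
-- all matching indices and taking the last; same cost, different decomposition.

-- ===== PORT A =====
-- A's backward loop: for i in range(len(word)-1, -1, -1): if word[i] == sep: break
def findSepA (word : String) (sep : String) : List Int → Int
  | [] => -1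
  | i :: rest =>
    match PySem.Str.pyGet? word i with
    | some c => if [c] == sep.toList then i else findSepA word sep rest
    | none => findSepA word sep rest   -- unreachable: i comes from range(len-1,-1,-1)

def Rpartition (word : String) (sep : String) : String × String × String :=
  let si := findSepA word sep (PySem.List.pyRange (PySem.Str.len word - 1) (-1) (-1))
  if si = -1 then ("", "", word)
  else (PySem.Str.slice word none (some si), sep, PySem.Str.slice word (some (si + 1)) none)

-- ===== PORT B =====
def Rpartition_alt (word : String) (sep : String) : String × String × String :=
  let indices := ((PySem.List.enumerate word.toList 0).filter
      (fun p => [p.2] == sep.toList)).map (·.1)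
  if indices = [] then ("", "", word)
  else
    let i := PySem.List.pyGetD indices (-1) 0
    (PySem.Str.slice word none (some i), sep, PySem.Str.slice word (some (i + 1)) none)

-- ===== PRECONDITION & SPEC =====
def Spec_Rpartition (word : String) (sep : String) (out : String × String × String) : Prop := out = Rpartition_alt word sep
instance (word : String) (sep : String) (out : String × String × String) : Decidable (Spec_Rpartition word sep out) := by unfold Spec_Rpartition; infer_instance

-- ===== CLAIM (what is proved, stated in full; the proofs are below) =====
def Claim_equal_Rpartition : Prop := ∀ (word : String) (sep : String), Dom_Rpartition word sep → Spec_Rpartition word sep (Rpartition word sep)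

-- ===== LEMMAS AND PROOFS =====

-- predicate "word[i] == sep" as A's loop tests it
def qA (word : String) (sep : String) (i : Int) : Bool :=
  match PySem.Str.pyGet? word i with
  | some c => [c] == sep.toList
  | none => false

theorem findSepA_eq (word sep : String) (is : List Int) :
    findSepA word sep is = ((is.filter (qA word sep)).head?).getD (-1) := by
  induction is with
  | nil => rfl
  | cons i rest ih =>
    rw [List.filter_cons]
    cases h : PySem.List.pyGet? word.toList i with
    | none =>
      have hq : qA word sep i = false := by simp [qA, PySem.Str.pyGet?, h]
      simp [findSepA, PySem.Str.pyGet?, h, hq, ih]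
    | some c =>
      have hq : qA word sep i = ([c] == sep.toList) := by simp [qA, PySem.Str.pyGet?, h]
      by_cases hc : ([c] == sep.toList) = true
      · simp [findSepA, PySem.Str.pyGet?, h, hq, hc]
      · simp [findSepA, PySem.Str.pyGet?, h, hq, hc, ih]

theorem indices_eq (word sep : String) :
    ((PySem.List.enumerate word.toList 0).filter (fun p => [p.2] == sep.toList)).map (·.1)
      = (PySem.List.pyRange 0 (PySem.List.len word.toList) 1).filter (qA word sep) := by
  rw [PySem.List.enumerate_eq_map_pyRange word.toList ' ', List.filter_map, List.map_map]
  have : ((·.1 : Int × Char → Int) ∘ fun j => (j, PySem.List.pyGetD word.toList j ' ')) = id := rfl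
  rw [this, List.map_id]
  apply List.filter_congr
  intro j hj
  rw [PySem.List.mem_pyRange_one] at hj
  simp only [PySem.List.len_eq] at hj
  have hget : PySem.List.pyGet? word.toList j = some (word.toList[j.toNat]) :=
    PySem.List.pyGet?_eq_some_getElem (xs := word.toList) (i := j) hj.1 hj.2
  have hgd : PySem.List.pyGetD word.toList j ' ' = word.toList[j.toNat] :=
    PySem.List.pyGetD_eq_getElem word.toList ' ' hj.1 (by simpa [PySem.List.len_eq] using hj.2)
  simp [Function.comp, qA, hget, hgd]

theorem Rpartition_spec : Claim_equal_Rpartition := by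
  intro word sep _
  unfold Spec_Rpartition Rpartition Rpartition_alt
  rw [indices_eq word sep]
  set v := (PySem.List.pyRange 0 (PySem.List.len word.toList) 1).filter (qA word sep) with hv
  have hA : findSepA word sep (PySem.List.pyRange (PySem.Str.len word - 1) (-1) (-1))
      = (v.getLast?).getD (-1) := by
    have hr : PySem.List.pyRange (PySem.Str.len word - 1) (-1) (-1)
        = (PySem.List.pyRange 0 (PySem.List.len word.toList) 1).reverse := by
      rw [PySem.List.pyRange_neg_one_eq_reverse]
      norm_num [PySem.Str.len_eq, PySem.List.len_eq]
    rw [hr, findSepA_eq, List.filter_reverse, List.head?_reverse, ← hv]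
  rw [hA]
  by_cases he : v = []
  · simp [he]
  · have hlast : v.getLast? = some (v.getLast he) := List.getLast?_eq_some_getLast he
    have hmem : v.getLast he ∈ v := List.getLast_mem he
    have hpos : 0 ≤ v.getLast he := by
      have h2 : v.getLast he ∈ (PySem.List.pyRange 0 (PySem.List.len word.toList) 1).filter (qA word sep) := hmem
      exact (PySem.List.mem_pyRange_one.mp (List.mem_filter.mp h2).1).1
    have hne : v.getLast he ≠ -1 := by omega
    rw [hlast]
    simp only [Option.getD_some, if_neg hne, if_neg he]
    rw [PySem.List.pyGetD_neg_one v 0 he]
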